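-- pv_equiv track=rewrite | github.com/uhlerlab/image2reg | src/utils/notebooks/translation/analysis.py | get_inv_gs_dict
-- ===== SOURCE A (Python) =====
-- def get_inv_gs_dict(targets, gs_dict):
--     inv_gs_dict = {}
--     for target in targets:
--         inv_gs_dict[target] = []
--         for k, v in gs_dict.items():
--             if target in list(v):
--                 inv_gs_dict[target].append(k)
--     return inv_gs_dict
-- ===== SOURCE B (Python) =====
-- def get_inv_gs_dict(targets, gs_dict):
--     inv = {t: [] for t in targets}
--     for k, v in gs_dict.items():
--         seen = set()
--         for x in v:
--             if x in inv and x not in seen: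
--                 inv[x].append(k)
--                 seen.add(x)
--     return inv
-- ===== Notes on version B (the rewrite author's own statement) =====
-- stated objective: faster
-- what changed: Replaced the per-target rescan of gs_dict by a single scatter pass over gs_dict.items() into a pre-built {target: []} dict, with a per-value seen-set to append each key at most once per value.
import Mathlib
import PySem

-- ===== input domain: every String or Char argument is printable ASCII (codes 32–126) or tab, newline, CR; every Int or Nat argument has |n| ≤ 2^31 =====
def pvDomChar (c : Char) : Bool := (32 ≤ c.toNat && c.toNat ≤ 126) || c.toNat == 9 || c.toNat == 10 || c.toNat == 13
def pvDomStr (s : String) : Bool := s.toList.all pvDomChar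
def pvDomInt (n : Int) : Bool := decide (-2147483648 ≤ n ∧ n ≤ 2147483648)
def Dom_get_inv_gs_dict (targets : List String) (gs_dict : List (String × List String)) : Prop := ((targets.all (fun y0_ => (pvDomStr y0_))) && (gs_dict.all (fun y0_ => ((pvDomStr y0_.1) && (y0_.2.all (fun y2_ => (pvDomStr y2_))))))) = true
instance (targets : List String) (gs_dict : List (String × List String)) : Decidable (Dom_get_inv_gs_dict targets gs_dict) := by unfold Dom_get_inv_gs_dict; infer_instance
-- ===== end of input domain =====

-- B replaces A's per-target rescan of gs_dict by one scatter pass over gs_dict into a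
-- pre-built {target: []} dict (per-value seen-set dedupes appends); return value only, no mutation.

-- ===== PORT A =====
def get_inv_gs_dict (targets : List String) (gs_dict : List (String × List String)) : List (String × List String) :=
  (targets.foldl (fun d target =>
      gs_dict.foldl (fun d kv =>
          if target ∈ kv.2 then d.modify target [] (fun l => l ++ [kv.1]) else d)
        (d.insert target []))
    PySem.Dict.empty).items

-- ===== PORT B =====
def get_inv_gs_dict_alt (targets : List String) (gs_dict : List (String × List String)) : List (String × List String) :=
  let inv := targets.foldl (fun d t => d.insert t ([] : List String)) PySem.Dict.empty
  (gs_dict.foldl (fun inv kv =>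
      (kv.2.foldl (fun (p : PySem.Dict String (List String) × PySem.Set String) x =>
          if p.1.contains x && !(PySem.Set.contains p.2 x) then
            (p.1.modify x [] (fun l => l ++ [kv.1]), PySem.Set.add p.2 x)
          else p)
        (inv, PySem.Set.empty)).1)
    inv).items

-- ===== PRECONDITION & SPEC =====
def Spec_get_inv_gs_dict (targets : List String) (gs_dict : List (String × List String)) (out : List (String × List String)) : Prop := out = get_inv_gs_dict_alt targets gs_dict
instance (targets : List String) (gs_dict : List (String × List String)) (out : List (String × List String)) : Decidable (Spec_get_inv_gs_dict targets gs_dict out) := by unfold Spec_get_inv_gs_dict; infer_instance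

-- ===== CLAIM (what is proved, stated in full; the proofs are below) =====
def Claim_equal_get_inv_gs_dict : Prop := ∀ (targets : List String) (gs_dict : List (String × List String)), Dom_get_inv_gs_dict targets gs_dict → Spec_get_inv_gs_dict targets gs_dict (get_inv_gs_dict targets gs_dict)

-- ===== LEMMAS AND PROOFS =====

-- the common value: keys of gs_dict whose value contains t, in order
def invList (gs_dict : List (String × List String)) (t : String) : List String :=
  (gs_dict.filter (fun kv => decide (t ∈ kv.2))).map (·.1)

theorem invList_cons (kv : String × List String) (gs : List (String × List String)) (t : String) :
    invList (kv :: gs) t = (if t ∈ kv.2 then [kv.1] else []) ++ invList gs t := by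
  simp [invList, List.filter_cons]; split_ifs <;> simp

-- ===== A-side lemmas =====
theorem A_inner_getD (gs : List (String × List String)) (t : String)
    (d : PySem.Dict String (List String)) (x : String) :
    (gs.foldl (fun d kv => if t ∈ kv.2 then d.modify t [] (fun l => l ++ [kv.1]) else d) d).getD x []
      = if x = t then d.getD t [] ++ invList gs t else d.getD x [] := by
  induction gs generalizing d with
  | nil => simp [invList]; exact fun h => by rw [h]
  | cons kv gs ih =>
    rw [List.foldl_cons, invList_cons]
    by_cases hm : t ∈ kv.2
    · rw [if_pos hm, ih]
      by_cases hx : x = t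
      · subst hx; simp [hm]
      · simp [hx, PySem.Dict.getD_modify]
    · rw [if_neg hm, ih]; simp [hm]

theorem A_inner_keys (gs : List (String × List String)) (t : String)
    (d : PySem.Dict String (List String)) (ht : t ∈ d.keys) :
    (gs.foldl (fun d kv => if t ∈ kv.2 then d.modify t [] (fun l => l ++ [kv.1]) else d) d).keys
      = d.keys := by
  induction gs generalizing d with
  | nil => rfl
  | cons kv gs ih =>
    rw [List.foldl_cons]
    by_cases hm : t ∈ kv.2
    · rw [if_pos hm]
      have hc : d.contains t = true := by
        rw [PySem.Dict.contains_eq_decide_mem_keys]; exact decide_eq_true ht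
      have hk : (d.modify t [] (fun l => l ++ [kv.1])).keys = d.keys := by
        rw [PySem.Dict.keys_modify, PySem.Dict.keys_insert_of_contains _ _ hc]
      rw [ih _ (by rw [hk]; exact ht), hk]
    · rw [if_neg hm]; exact ih d ht

theorem A_outer_keys (ts : List String) (gs : List (String × List String))
    (d : PySem.Dict String (List String)) :
    (ts.foldl (fun d target =>
        gs.foldl (fun d kv => if target ∈ kv.2 then d.modify target [] (fun l => l ++ [kv.1]) else d)
          (d.insert target [])) d).keys
      = PySem.Set.update d.keys ts := by
  induction ts generalizing d with
  | nil => rfl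
  | cons a ts ih =>
    rw [List.foldl_cons, PySem.Set.update_cons, ih]
    congr 1
    rw [A_inner_keys _ _ _ (by rw [PySem.Dict.mem_keys_insert]; exact Or.inl rfl)]
    rw [PySem.Set.add_eq_ite]
    by_cases ha : a ∈ d.keys
    · rw [if_pos ha]
      exact PySem.Dict.keys_insert_of_contains _ _
        (by rw [PySem.Dict.contains_eq_decide_mem_keys]; exact decide_eq_true ha)
    · rw [if_neg ha]
      exact PySem.Dict.keys_insert_of_not_contains _ _
        (by rw [PySem.Dict.contains_eq_decide_mem_keys]; exact decide_eq_false ha)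

theorem A_outer_getD (ts : List String) (gs : List (String × List String))
    (d : PySem.Dict String (List String)) (x : String) :
    (ts.foldl (fun d target =>
        gs.foldl (fun d kv => if target ∈ kv.2 then d.modify target [] (fun l => l ++ [kv.1]) else d)
          (d.insert target [])) d).getD x []
      = if x ∈ ts then invList gs x else d.getD x [] := by
  induction ts generalizing d with
  | nil => simp
  | cons a ts ih =>
    rw [List.foldl_cons, ih]
    by_cases hts : x ∈ ts
    · simp [hts]
    · by_cases hxa : x = a
      · subst hxa
        simp [hts, A_inner_getD]
      · simp [hts, hxa, A_inner_getD, PySem.Dict.getD_insert]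

-- ===== B-side lemmas =====
theorem B_base_keys (ts : List String) (d : PySem.Dict String (List String)) :
    (ts.foldl (fun d t => d.insert t ([] : List String)) d).keys = PySem.Set.update d.keys ts :=
  PySem.Dict.keys_foldl_insert ts (fun _ _ => []) d

theorem B_base_getD (ts : List String) (d : PySem.Dict String (List String)) (x : String) :
    (ts.foldl (fun d t => d.insert t ([] : List String)) d).getD x []
      = if x ∈ ts then [] else d.getD x [] := by
  induction ts generalizing d with
  | nil => simp
  | cons a ts ih =>
    rw [List.foldl_cons, ih]
    by_cases hts : x ∈ ts
    · simp [hts]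
    · by_cases hxa : x = a
      · subst hxa; simp [hts]
      · simp [hts, hxa, PySem.Dict.getD_insert]

theorem B_inner (v : List String) (k : String)
    (d : PySem.Dict String (List String)) (seen : PySem.Set String) (x : String) :
    ((v.foldl (fun (p : PySem.Dict String (List String) × PySem.Set String) y =>
        if p.1.contains y && !(PySem.Set.contains p.2 y) then
          (p.1.modify y [] (fun l => l ++ [k]), PySem.Set.add p.2 y)
        else p) (d, seen)).1).getD x []
        = d.getD x [] ++ (if d.contains x = true ∧ x ∈ v ∧ x ∉ seen then [k] else [])
    ∧ ((v.foldl (fun (p : PySem.Dict String (List String) × PySem.Set String) y =>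
        if p.1.contains y && !(PySem.Set.contains p.2 y) then
          (p.1.modify y [] (fun l => l ++ [k]), PySem.Set.add p.2 y)
        else p) (d, seen)).1).keys = d.keys := by
  induction v generalizing d seen with
  | nil => simp
  | cons y v ih =>
    rw [List.foldl_cons]
    by_cases hc : d.contains y = true
    · by_cases hs : y ∈ seen
      · rw [if_neg (by simp [hs])]
        obtain ⟨h1, h2⟩ := ih d seen
        refine ⟨?_, h2⟩
        rw [h1]
        by_cases hxy : x = y
        · subst hxy; simp [hs]
        · congr 1
          by_cases hxv : x ∈ v <;> simp [hxv, hxy]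
      · rw [if_pos (by simp [hc, hs])]
        have hky : y ∈ d.keys := by
          rw [PySem.Dict.contains_eq_decide_mem_keys] at hc; exact of_decide_eq_true hc
        have hkeys : (d.modify y [] (fun l => l ++ [k])).keys = d.keys := by
          rw [PySem.Dict.keys_modify, PySem.Dict.keys_insert_of_contains _ _ hc]
        obtain ⟨h1, h2⟩ := ih (d.modify y [] (fun l => l ++ [k])) (PySem.Set.add seen y)
        have hcont : ∀ z, (d.modify y [] (fun l => l ++ [k])).contains z = d.contains z := by
          intro z
          rw [PySem.Dict.contains_eq_decide_mem_keys, PySem.Dict.contains_eq_decide_mem_keys, hkeys]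
        refine ⟨?_, by rw [h2, hkeys]⟩
        rw [h1, hcont, PySem.Dict.getD_modify]
        by_cases hxy : x = y
        · subst hxy
          simp [hc, hs]
        · rw [if_neg hxy]
          congr 1
          by_cases hxv : x ∈ v <;> simp [hxv, hxy, PySem.Set.mem_add]
    · by_cases hxy : x = y
      · subst hxy
        rw [if_neg (by simp [hc])]
        obtain ⟨h1, h2⟩ := ih d seen
        refine ⟨?_, h2⟩
        rw [h1]
        congr 1
        by_cases hxv : x ∈ v <;> simp [hxv, hc]
      · rw [if_neg (by simp [hc])]
        obtain ⟨h1, h2⟩ := ih d seen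
        refine ⟨?_, h2⟩
        rw [h1]
        congr 1
        by_cases hxv : x ∈ v <;> simp [hxv, hxy]

theorem B_outer (gs : List (String × List String))
    (d : PySem.Dict String (List String)) (x : String) :
    ((gs.foldl (fun inv kv =>
        (kv.2.foldl (fun (p : PySem.Dict String (List String) × PySem.Set String) y =>
            if p.1.contains y && !(PySem.Set.contains p.2 y) then
              (p.1.modify y [] (fun l => l ++ [kv.1]), PySem.Set.add p.2 y)
            else p) (inv, PySem.Set.empty)).1) d).getD x []
        = d.getD x [] ++ (if x ∈ d.keys then invList gs x else []))
    ∧ (gs.foldl (fun inv kv =>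
        (kv.2.foldl (fun (p : PySem.Dict String (List String) × PySem.Set String) y =>
            if p.1.contains y && !(PySem.Set.contains p.2 y) then
              (p.1.modify y [] (fun l => l ++ [kv.1]), PySem.Set.add p.2 y)
            else p) (inv, PySem.Set.empty)).1) d).keys = d.keys := by
  induction gs generalizing d with
  | nil => simp [invList]
  | cons kv gs ih =>
    rw [List.foldl_cons]
    obtain ⟨g1, g2⟩ := B_inner kv.2 kv.1 d PySem.Set.empty x
    obtain ⟨h1, h2⟩ := ih ((kv.2.foldl (fun (p : PySem.Dict String (List String) × PySem.Set String) y =>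
            if p.1.contains y && !(PySem.Set.contains p.2 y) then
              (p.1.modify y [] (fun l => l ++ [kv.1]), PySem.Set.add p.2 y)
            else p) (d, PySem.Set.empty)).1)
    refine ⟨?_, by rw [h2, g2]⟩
    rw [h1, g1, g2, invList_cons]
    by_cases hk : x ∈ d.keys
    · have hc : d.contains x = true := by
        rw [PySem.Dict.contains_eq_decide_mem_keys]; exact decide_eq_true hk
      by_cases hxv : x ∈ kv.2 <;>
        simp [hk, hc, hxv, PySem.Set.empty, List.append_assoc]
    · have hc : d.contains x ≠ true := by
        rw [PySem.Dict.contains_eq_decide_mem_keys]; simp [hk]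
      simp [hk, hc]

-- ===== assembling =====
theorem A_char (targets : List String) (gs : List (String × List String)) :
    get_inv_gs_dict targets gs
      = (PySem.Set.ofList targets).map (fun t => (t, invList gs t)) := by
  unfold get_inv_gs_dict
  have hkeys := A_outer_keys targets gs PySem.Dict.empty
  rw [PySem.Dict.keys_empty, PySem.Set.update_nil_left] at hkeys
  rw [PySem.Dict.items_eq_map_keys _ (by rw [hkeys]; exact PySem.Set.nodup_ofList targets) [], hkeys]
  apply List.map_congr_left
  intro t ht
  have : t ∈ targets := (PySem.Set.mem_ofList _ _).mp ht
  rw [A_outer_getD, if_pos this]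

theorem B_char (targets : List String) (gs : List (String × List String)) :
    get_inv_gs_dict_alt targets gs
      = (PySem.Set.ofList targets).map (fun t => (t, invList gs t)) := by
  unfold get_inv_gs_dict_alt
  have hbk := B_base_keys targets PySem.Dict.empty
  rw [PySem.Dict.keys_empty, PySem.Set.update_nil_left] at hbk
  have hkeys := (B_outer gs (targets.foldl (fun d t => d.insert t ([] : List String)) PySem.Dict.empty) "").2
  rw [hbk] at hkeys
  rw [PySem.Dict.items_eq_map_keys _ (by rw [hkeys]; exact PySem.Set.nodup_ofList targets) [], hkeys]
  apply List.map_congr_left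
  intro t ht
  have htm : t ∈ targets := (PySem.Set.mem_ofList _ _).mp ht
  have := (B_outer gs (targets.foldl (fun d t => d.insert t ([] : List String)) PySem.Dict.empty) t).1
  rw [this, hbk, B_base_getD, if_pos htm, if_pos ht]
  simp

-- ===== VERDICT (by name: the statement is the Claim_ definition above) =====
theorem get_inv_gs_dict_spec : Claim_equal_get_inv_gs_dict := by
  intro targets gs_dict _
  unfold Spec_get_inv_gs_dict
  rw [A_char, B_char]
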